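-- pv_equiv track=rewrite | github.com/shivangitripathi2712/long_output_misinformation_revision | utils/editor.py | parse_editor_response
-- ===== SOURCE A (Python) =====
-- from typing import List, Dict, Any, Optional
--
-- def parse_editor_response(api_response: str) -> Optional[str]:
--     for line in api_response.strip().split("\n"):
--         if "My fix:" in line:
--             edited_claim = line.split("My fix:")[-1].strip()
--             if edited_claim:
--                 return edited_claim
--     for line in api_response.strip().split("\n"):
--         line = line.strip()
--         if line and line[0].isupper() and line[-1] in '.!?':
--             return line
--     return None
-- ===== SOURCE B (Python) =====
-- def parse_editor_response(api_response: str):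
--     fallback = None
--     for line in api_response.strip().split("\n"):
--         if "My fix:" in line and line.split("My fix:")[-1].strip():
--             return line.split("My fix:")[-1].strip()
--         if fallback is None:
--             s = line.strip()
--             if s and s[0].isupper() and s[-1] in '.!?':
--                 fallback = s
--     return fallback
-- ===== Notes on version B (the rewrite author's own statement) =====
-- stated objective: alternative
-- what changed: A's two sequential passes over the lines (fix-claim pass, then sentence pass) are collapsed into one pass that returns a non-empty fix-marker claim immediately and remembers the first sentence-shaped stripped line as a fallback returned after the loop.
import Mathlib
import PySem

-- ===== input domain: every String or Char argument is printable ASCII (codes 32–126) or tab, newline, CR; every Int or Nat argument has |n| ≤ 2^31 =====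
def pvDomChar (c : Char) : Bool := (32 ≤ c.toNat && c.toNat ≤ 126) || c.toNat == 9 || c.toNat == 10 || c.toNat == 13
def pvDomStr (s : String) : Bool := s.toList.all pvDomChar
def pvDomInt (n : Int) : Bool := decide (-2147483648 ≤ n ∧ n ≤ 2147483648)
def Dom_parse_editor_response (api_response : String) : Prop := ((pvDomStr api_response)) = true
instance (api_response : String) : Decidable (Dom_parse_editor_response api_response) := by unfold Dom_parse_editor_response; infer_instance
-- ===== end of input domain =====

-- B collapses A's two sequential passes over the lines into one pass that returns a
-- "My fix:" claim immediately and remembers the first sentence-shaped line as a fallback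
-- (objective: alternative single-pass decomposition; same asymptotic cost).


-- shared by both ports (both Pythons compute exactly these expressions)
-- line.split("My fix:")[-1].strip()
def pvFixClaim (line : String) : String :=
  PySem.Str.strip (((PySem.Str.split? line "My fix:").getD []).getLastD "")

-- l and l[0].isupper() and l[-1] in '.!?'   (on an already-stripped l)
def pvSentenceOk (l : String) : Bool :=
  l ≠ "" &&
  (match PySem.Str.pyGet? l 0 with | some c => PySem.Chars.isupper c | none => false) &&
  (match PySem.Str.pyGet? l (-1) with | some c => PySem.Chars.isIn [c] ".!?".toList | none => false)

-- ===== PORT A =====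
-- first pass: look for a line containing "My fix:" with a non-empty claim
def pvA_loop1 : List String → Option String
  | [] => none
  | line :: rest =>
    if PySem.Str.isIn "My fix:" line then
      let edited_claim := pvFixClaim line
      if edited_claim ≠ "" then some edited_claim else pvA_loop1 rest
    else pvA_loop1 rest

-- second pass: first stripped line that looks like a sentence
def pvA_loop2 : List String → Option String
  | [] => none
  | line :: rest =>
    let l := PySem.Str.strip line
    if pvSentenceOk l then some l else pvA_loop2 rest

def parse_editor_response (api_response : String) : Option String :=
  let lines := (PySem.Str.split? (PySem.Str.strip api_response) "\n").getD []
  match pvA_loop1 lines with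
  | some r => some r
  | none => pvA_loop2 lines

-- ===== PORT B =====
-- one pass: return a fix claim at once, remember the first sentence-shaped line as fallback
def pvB_loop : List String → Option String → Option String
  | [], fallback => fallback
  | line :: rest, fallback =>
    if PySem.Str.isIn "My fix:" line && pvFixClaim line ≠ "" then
      some (pvFixClaim line)
    else
      pvB_loop rest
        (if fallback.isNone && pvSentenceOk (PySem.Str.strip line)
         then some (PySem.Str.strip line) else fallback)

def parse_editor_response_alt (api_response : String) : Option String :=
  pvB_loop ((PySem.Str.split? (PySem.Str.strip api_response) "\n").getD []) none

-- ===== PRECONDITION & SPEC =====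
def Spec_parse_editor_response (api_response : String) (out : Option String) : Prop := out = parse_editor_response_alt api_response
instance (api_response : String) (out : Option String) : Decidable (Spec_parse_editor_response api_response out) := by unfold Spec_parse_editor_response; infer_instance

-- ===== CLAIM (what is proved, stated in full; the proofs are below) =====
def Claim_equal_parse_editor_response : Prop := ∀ (api_response : String), Dom_parse_editor_response api_response → Spec_parse_editor_response api_response (parse_editor_response api_response)

-- ===== LEMMAS AND PROOFS =====
-- loop invariant: B's single pass equals A's two passes with the pending fallback in between
theorem pvB_loop_eq (lines : List String) : ∀ fb : Option String,
    pvB_loop lines fb =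
      match pvA_loop1 lines with
      | some r => some r
      | none => match fb with | some f => some f | none => pvA_loop2 lines := by
  induction lines with
  | nil => intro fb; cases fb <;> simp [pvB_loop, pvA_loop1, pvA_loop2]
  | cons line rest ih =>
    intro fb
    simp only [pvB_loop, pvA_loop1, pvA_loop2]
    rcases hin : PySem.Str.isIn "My fix:" line with _ | _
    · simp only [Bool.false_and, Bool.false_eq_true, reduceIte, ih]
      cases fb <;> by_cases hs : pvSentenceOk (PySem.Str.strip line) = true <;>
        simp [hs]
    · by_cases hc : pvFixClaim line = ""
      · simp only [hc, Bool.true_and, ne_eq, not_true_eq_false, decide_false,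
          Bool.false_eq_true, reduceIte, ih]
        cases fb <;> by_cases hs : pvSentenceOk (PySem.Str.strip line) = true <;>
          simp [hs]
      · simp [hc]

-- ===== VERDICT (by name: the statement is the Claim_ definition above) =====
theorem parse_editor_response_spec : Claim_equal_parse_editor_response := by
  intro api _
  unfold Spec_parse_editor_response parse_editor_response parse_editor_response_alt
  rw [pvB_loop_eq]
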